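-- pv_equiv track=rewrite | github.com/Teatot/Advent-of-Code-Solutions | day (14) Part 1 & 2.py | difference_max_min
-- ===== SOURCE A (Python) =====
-- def difference_max_min (word, letters):
--     let = {}
--     max_let, min_let = letters[0], letters[0]
--     for letter in letters:
--         let[letter] = len([x for x in word if x == letter])
--         if let[max_let] < let[letter]:
--             max_let = letter
--         elif let[min_let] > let[letter]:
--             min_let = letter
--     return let[max_let] - let[min_let]
-- ===== SOURCE B (Python) =====
-- def difference_max_min(word, letters):
--     counts = sorted(len([x for x in word if x == l]) for l in letters)
--     return counts[-1] - counts[0]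
-- ===== Notes on version B (the rewrite author's own statement) =====
-- stated objective: simpler
-- what changed: Replaces the dict of counts plus interleaved running max-letter/min-letter tracking with building the list of per-letter counts, sorting it, and returning last minus first.
import Mathlib
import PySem

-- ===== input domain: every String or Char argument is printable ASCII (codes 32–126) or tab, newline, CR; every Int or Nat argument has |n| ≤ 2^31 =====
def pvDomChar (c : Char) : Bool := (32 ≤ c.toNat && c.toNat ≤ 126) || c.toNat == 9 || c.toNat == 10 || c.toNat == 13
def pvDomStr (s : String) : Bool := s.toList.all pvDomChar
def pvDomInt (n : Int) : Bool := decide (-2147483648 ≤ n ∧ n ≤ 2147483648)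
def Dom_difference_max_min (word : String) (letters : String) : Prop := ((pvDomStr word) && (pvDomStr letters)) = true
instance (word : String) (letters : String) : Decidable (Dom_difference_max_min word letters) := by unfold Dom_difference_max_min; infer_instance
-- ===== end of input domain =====

-- B sorts the list of per-letter counts and returns last minus first, instead of A's
-- dict plus interleaved running max/min-letter tracking (objective: simpler).

-- ===== PORT A =====
def difference_max_min (word : String) (letters : String) : Int :=
  match letters.toList with
  | [] => 0  -- Python raises IndexError on letters[0] here; excluded by Pre_
  | c0 :: _ =>
    let st := letters.toList.foldl
      (fun (s : PySem.Dict Char Int × Char × Char) letter =>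
        let d := PySem.Dict.insert s.1 letter ((word.toList.filter (fun x => x == letter)).length : Int)
        if PySem.Dict.getD d s.2.1 0 < PySem.Dict.getD d letter 0 then (d, letter, s.2.2)
        else if PySem.Dict.getD d s.2.2 0 > PySem.Dict.getD d letter 0 then (d, s.2.1, letter)
        else (d, s.2.1, s.2.2))
      (PySem.Dict.empty, c0, c0)
    PySem.Dict.getD st.1 st.2.1 0 - PySem.Dict.getD st.1 st.2.2 0

-- ===== PORT B =====
def difference_max_min_alt (word : String) (letters : String) : Int :=
  let counts := PySem.List.sorted
    (letters.toList.map (fun l => ((word.toList.filter (fun x => x == l)).length : Int)))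
    (fun x => x) false
  -- counts[-1] - counts[0]; on empty letters Python raises IndexError (excluded by Pre_)
  PySem.List.pyGetD counts (-1) 0 - PySem.List.pyGetD counts 0 0

-- ===== PRECONDITION & SPEC =====
-- Pre_ excludes only the empty letters string, on which both A and B raise IndexError.
def Pre_difference_max_min (word : String) (letters : String) : Prop := letters ≠ ""
instance (word : String) (letters : String) : Decidable (Pre_difference_max_min word letters) := by
  unfold Pre_difference_max_min; infer_instance
def pvWitness_difference_max_min : String × String := ("aab", "ab")

def Spec_difference_max_min (word : String) (letters : String) (out : Int) : Prop := out = difference_max_min_alt word letters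
instance (word : String) (letters : String) (out : Int) : Decidable (Spec_difference_max_min word letters out) := by unfold Spec_difference_max_min; infer_instance

-- ===== CLAIM (what is proved, stated in full; the proofs are below) =====
def Claim_equal_difference_max_min : Prop := ∀ (word : String) (letters : String), Dom_difference_max_min word letters → Pre_difference_max_min word letters → Spec_difference_max_min word letters (difference_max_min word letters)

-- ===== LEMMAS AND PROOFS =====

-- the per-letter count both programs compute
def pvCnt (word : List Char) (c : Char) : Int := ((word.filter (fun x => x == c)).length : Int)

-- A's loop body, as in the port
def pvStep (w : List Char) (s : PySem.Dict Char Int × Char × Char) (letter : Char) : PySem.Dict Char Int × Char × Char :=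
  let d := PySem.Dict.insert s.1 letter ((w.filter (fun x => x == letter)).length : Int)
  if PySem.Dict.getD d s.2.1 0 < PySem.Dict.getD d letter 0 then (d, letter, s.2.2)
  else if PySem.Dict.getD d s.2.2 0 > PySem.Dict.getD d letter 0 then (d, s.2.1, letter)
  else (d, s.2.1, s.2.2)

lemma pvGetD_of_get? {d : PySem.Dict Char Int} {c : Char} {v : Int} (h : d.get? c = some v) :
    d.getD c 0 = v := by
  simp [PySem.Dict.getD, PySem.Dict.get?] at *
  obtain ⟨a, ha⟩ := h
  rw [ha]
  rfl

-- getD of a contained key in a dict whose every entry is the count of its key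
lemma pvGetD_good (w : List Char) (d : PySem.Dict Char Int) (c : Char)
    (hg : ∀ c' v, d.get? c' = some v → v = pvCnt w c')
    (hc : d.contains c = true) :
    d.getD c 0 = pvCnt w c := by
  cases hv : d.get? c with
  | none => rw [PySem.Dict.get?_eq_none_iff_contains] at hv; simp [hv] at hc
  | some v => rw [pvGetD_of_get? hv]; exact hg c v hv

-- invariant of A's fold: entries are counts, the tracked letters are in the dict and
-- carry the running max / min of the counts seen so far
lemma pvFold_inv (w : List Char) (xs : List Char) :
    ∀ (d : PySem.Dict Char Int) (maxl minl : Char),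
    (∀ c v, d.get? c = some v → v = pvCnt w c) →
    d.contains maxl = true → d.contains minl = true →
    pvCnt w minl ≤ pvCnt w maxl →
    ((∀ c v, (xs.foldl (pvStep w) (d, maxl, minl)).1.get? c = some v → v = pvCnt w c) ∧
     (xs.foldl (pvStep w) (d, maxl, minl)).1.contains (xs.foldl (pvStep w) (d, maxl, minl)).2.1 = true ∧
     (xs.foldl (pvStep w) (d, maxl, minl)).1.contains (xs.foldl (pvStep w) (d, maxl, minl)).2.2 = true ∧
     pvCnt w (xs.foldl (pvStep w) (d, maxl, minl)).2.1 = xs.foldl (fun a c => max a (pvCnt w c)) (pvCnt w maxl) ∧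
     pvCnt w (xs.foldl (pvStep w) (d, maxl, minl)).2.2 = xs.foldl (fun a c => min a (pvCnt w c)) (pvCnt w minl)) := by
  induction xs with
  | nil => intro d maxl minl hg hM hm _; exact ⟨hg, hM, hm, rfl, rfl⟩
  | cons x t ih =>
    intro d maxl minl hg hM hm hle
    have hgood' : ∀ c v, (d.insert x (pvCnt w x)).get? c = some v → v = pvCnt w c := by
      intro c v hv
      rw [PySem.Dict.get?_insert] at hv
      split at hv
      · rename_i hcx; injection hv with hv; rw [← hv, hcx]
      · exact hg c v hv
    have hDx : (d.insert x (pvCnt w x)).getD x 0 = pvCnt w x :=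
      pvGetD_good w _ x hgood' (PySem.Dict.contains_insert_self d x _)
    have hDM : (d.insert x (pvCnt w x)).getD maxl 0 = pvCnt w maxl :=
      pvGetD_good w _ maxl hgood' (by rw [PySem.Dict.contains_insert]; simp [hM])
    have hDm : (d.insert x (pvCnt w x)).getD minl 0 = pvCnt w minl :=
      pvGetD_good w _ minl hgood' (by rw [PySem.Dict.contains_insert]; simp [hm])
    have hcM : (d.insert x (pvCnt w x)).contains maxl = true := by
      rw [PySem.Dict.contains_insert]; simp [hM]
    have hcm : (d.insert x (pvCnt w x)).contains minl = true := by
      rw [PySem.Dict.contains_insert]; simp [hm]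
    have hcx : (d.insert x (pvCnt w x)).contains x = true := PySem.Dict.contains_insert_self d x _
    have hstep : pvStep w (d, maxl, minl) x =
        if pvCnt w maxl < pvCnt w x then (d.insert x (pvCnt w x), x, minl)
        else if pvCnt w minl > pvCnt w x then (d.insert x (pvCnt w x), maxl, x)
        else (d.insert x (pvCnt w x), maxl, minl) := by
      show (if (d.insert x (pvCnt w x)).getD maxl 0 < (d.insert x (pvCnt w x)).getD x 0 then
          (d.insert x (pvCnt w x), x, minl)
        else if (d.insert x (pvCnt w x)).getD minl 0 > (d.insert x (pvCnt w x)).getD x 0 then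
          (d.insert x (pvCnt w x), maxl, x)
        else (d.insert x (pvCnt w x), maxl, minl)) = _
      rw [hDx, hDM, hDm]
    simp only [List.foldl_cons, hstep]
    split_ifs with h1 h2
    · have := ih (d.insert x (pvCnt w x)) x minl hgood' hcx hcm (by omega)
      refine ⟨this.1, this.2.1, this.2.2.1, ?_, ?_⟩
      · rw [this.2.2.2.1]; congr 1; omega
      · rw [this.2.2.2.2]; congr 1; omega
    · have := ih (d.insert x (pvCnt w x)) maxl x hgood' hcM hcx (by omega)
      refine ⟨this.1, this.2.1, this.2.2.1, ?_, ?_⟩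
      · rw [this.2.2.2.1]; congr 1; omega
      · rw [this.2.2.2.2]; congr 1; omega
    · have := ih (d.insert x (pvCnt w x)) maxl minl hgood' hcM hcm hle
      refine ⟨this.1, this.2.1, this.2.2.1, ?_, ?_⟩
      · rw [this.2.2.2.1]; congr 1; omega
      · rw [this.2.2.2.2]; congr 1; omega

-- in a ≤-sorted list every element is at most the last one
lemma pvLe_getLast : ∀ (l : List Int) (hp : l.Pairwise (· ≤ ·)) (hne : l ≠ []) (x : Int),
    x ∈ l → x ≤ l.getLast hne := by
  intro l
  induction l with
  | nil => intro _ hne; exact absurd rfl hne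
  | cons a t ih =>
    intro hp hne x hx
    cases t with
    | nil => simp at hx; simp [hx]
    | cons b u =>
      rw [List.getLast_cons (by simp)]
      rcases List.mem_cons.mp hx with h | h
      · subst h
        have hbt : (b :: u).getLast (by simp) ∈ b :: u := List.getLast_mem _
        exact le_trans (List.rel_of_pairwise_cons hp hbt) (le_refl _)
      · exact ih (List.Pairwise.of_cons hp) (by simp) x h

-- B returns (max of counts) - (min of counts), as folds
lemma pvAlt_eq (word letters : String) (c0 : Char) (rest : List Char)
    (h : letters.toList = c0 :: rest) :
    difference_max_min_alt word letters =
      rest.foldl (fun a c => max a (pvCnt word.toList c)) (pvCnt word.toList c0) -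
      rest.foldl (fun a c => min a (pvCnt word.toList c)) (pvCnt word.toList c0) := by
  unfold difference_max_min_alt
  rw [h]
  have hmapeq : (c0 :: rest).map (fun l => ((word.toList.filter (fun x => x == l)).length : Int)) =
      pvCnt word.toList c0 :: rest.map (pvCnt word.toList) := by
    simp [pvCnt]
  rw [hmapeq]
  set L : List Int := pvCnt word.toList c0 :: rest.map (pvCnt word.toList) with hL
  set S : List Int := PySem.List.sorted L (fun x => x) false with hS
  show PySem.List.pyGetD S (-1) 0 - PySem.List.pyGetD S 0 0 = _
  have hperm : S.Perm L := PySem.List.sorted_perm L (fun x => x) false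
  have hSne : S ≠ [] := by
    intro hnil
    have := hperm.length_eq
    rw [hnil] at this
    simp [hL] at this
  obtain ⟨s0, t, hcons⟩ := List.exists_cons_of_ne_nil hSne
  -- head of the sorted list = foldl min
  have hmemS : ∀ y, y ∈ S ↔ y ∈ L := fun y => hperm.mem_iff
  have hmin : s0 = (rest.map (pvCnt word.toList)).foldl min (pvCnt word.toList c0) := by
    have h1 : ∀ y ∈ L, s0 ≤ y := by
      intro y hy
      exact PySem.List.key_head_sorted_le L (fun x => x) hcons y hy
    have h2 : L.min? = some ((rest.map (pvCnt word.toList)).foldl min (pvCnt word.toList c0)) :=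
      List.min?_cons'
    obtain ⟨hmem, hleall⟩ := List.min?_eq_some_iff.mp h2
    have hs0L : s0 ∈ L := (hmemS s0).mp (by rw [hcons]; simp)
    exact le_antisymm (h1 _ hmem) (hleall _ hs0L)
  -- last of the sorted list = foldl max
  have hmax : S.getLast hSne = (rest.map (pvCnt word.toList)).foldl max (pvCnt word.toList c0) := by
    have hpair : S.Pairwise (· ≤ ·) := PySem.List.sorted_pairwise L (fun x => x)
    have h1 : ∀ y ∈ L, y ≤ S.getLast hSne := by
      intro y hy
      exact pvLe_getLast S hpair hSne y ((hmemS y).mpr hy)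
    have h2 : L.max? = some ((rest.map (pvCnt word.toList)).foldl max (pvCnt word.toList c0)) :=
      List.max?_cons'
    obtain ⟨hmem, hgeall⟩ := List.max?_eq_some_iff.mp h2
    have hlastL : S.getLast hSne ∈ L := (hmemS _).mp (List.getLast_mem hSne)
    exact le_antisymm (hgeall _ hlastL) (h1 _ hmem)
  rw [PySem.List.pyGetD_neg_one S 0 hSne, hmax]
  have hhead : PySem.List.pyGetD S 0 0 = s0 := by rw [hcons]; exact PySem.List.pyGetD_zero_cons s0 t 0
  rw [hhead, hmin]
  rw [List.foldl_map, List.foldl_map]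

-- ===== VERDICT (by name: the statement is the Claim_ definition above) =====
theorem difference_max_min_spec : Claim_equal_difference_max_min := by
  intro word letters _ hpre
  unfold Spec_difference_max_min
  obtain ⟨c0, rest, h⟩ : ∃ c0 rest, letters.toList = c0 :: rest := by
    cases hl : letters.toList with
    | nil => exact absurd (String.toList_eq_nil_iff.mp hl) hpre
    | cons a t => exact ⟨a, t, rfl⟩
  rw [pvAlt_eq word letters c0 rest h]
  unfold difference_max_min
  rw [h]
  simp only
  -- first loop iteration, by hand
  have hstep0 : pvStep word.toList (PySem.Dict.empty, c0, c0) c0 =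
      (PySem.Dict.empty.insert c0 (pvCnt word.toList c0), c0, c0) := by
    show (if (PySem.Dict.empty.insert c0 (pvCnt word.toList c0)).getD c0 0 <
            (PySem.Dict.empty.insert c0 (pvCnt word.toList c0)).getD c0 0 then
          (PySem.Dict.empty.insert c0 (pvCnt word.toList c0), c0, c0)
      else if (PySem.Dict.empty.insert c0 (pvCnt word.toList c0)).getD c0 0 >
            (PySem.Dict.empty.insert c0 (pvCnt word.toList c0)).getD c0 0 then
          (PySem.Dict.empty.insert c0 (pvCnt word.toList c0), c0, c0)
      else (PySem.Dict.empty.insert c0 (pvCnt word.toList c0), c0, c0)) = _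
    simp
  have hgood1 : ∀ c v, (PySem.Dict.empty.insert c0 (pvCnt word.toList c0)).get? c = some v →
      v = pvCnt word.toList c := by
    intro c v hv
    rw [PySem.Dict.get?_insert] at hv
    split at hv
    · rename_i hcc; injection hv with hv; rw [← hv, hcc]
    · rw [PySem.Dict.get?_empty] at hv; cases hv
  have hc1 : (PySem.Dict.empty.insert c0 (pvCnt word.toList c0)).contains c0 = true :=
    PySem.Dict.contains_insert_self _ c0 _
  have hinv := pvFold_inv word.toList rest (PySem.Dict.empty.insert c0 (pvCnt word.toList c0))
      c0 c0 hgood1 hc1 hc1 (le_refl _)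
  show (List.foldl (pvStep word.toList) (PySem.Dict.empty, c0, c0) (c0 :: rest)).1.getD
        (List.foldl (pvStep word.toList) (PySem.Dict.empty, c0, c0) (c0 :: rest)).2.1 0 -
      (List.foldl (pvStep word.toList) (PySem.Dict.empty, c0, c0) (c0 :: rest)).1.getD
        (List.foldl (pvStep word.toList) (PySem.Dict.empty, c0, c0) (c0 :: rest)).2.2 0 = _
  rw [List.foldl_cons, hstep0]
  rw [pvGetD_good word.toList _ _ hinv.1 hinv.2.1, pvGetD_good word.toList _ _ hinv.1 hinv.2.2.1,
    hinv.2.2.2.1, hinv.2.2.2.2]
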